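-- pv_equiv track=rewrite | github.com/Sodment/BasicCryptography | lab1-ubich/ubich.py | get_original_positions
-- ===== SOURCE A (Python) =====
-- def get_original_positions(original):
--     positions = []
--     org = []
--     for i in range(len(original)):
--         org.append((original[i], i))
--     mov = sorted(org, key=lambda x: x[0])
--     for i in org:
--         index = 0
--         for j in mov:
--             if i[1] != j[1]:
--                 index += 1
--             else:
--                 positions.append(index)
--                 index = 0
--     return positions
-- ===== SOURCE B (Python) =====
-- def get_original_positions(original):
--     n = len(original)
--     order = sorted(range(n), key=lambda i: original[i])
--     positions = [0] * n
--     for rank, i in enumerate(order):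
--         positions[i] = rank
--     return positions
-- ===== Notes on version B (the rewrite author's own statement) =====
-- stated objective: faster
-- what changed: Instead of scanning the whole sorted list for each element (quadratic), B sorts the indices once by their character and scatters each sorted rank back to its original index in one pass.
import Mathlib
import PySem

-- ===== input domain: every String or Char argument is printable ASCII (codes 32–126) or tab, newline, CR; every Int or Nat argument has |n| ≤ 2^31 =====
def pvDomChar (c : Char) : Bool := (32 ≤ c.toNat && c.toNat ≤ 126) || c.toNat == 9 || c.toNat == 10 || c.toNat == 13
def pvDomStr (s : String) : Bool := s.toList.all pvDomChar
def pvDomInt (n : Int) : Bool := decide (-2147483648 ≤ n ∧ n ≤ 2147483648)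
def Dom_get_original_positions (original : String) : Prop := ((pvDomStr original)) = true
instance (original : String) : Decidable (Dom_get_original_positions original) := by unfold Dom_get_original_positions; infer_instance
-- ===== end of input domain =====

-- B replaces A's quadratic per-element scan of the sorted list by one sort of the
-- indices and a single scatter pass writing each sorted rank to its original index.

-- ===== PORT A =====
def get_original_positions (original : String) : List Int :=
  let cs := original.toList
  let org := (PySem.List.pyRange 0 (cs.length : Int) 1).foldl
      (fun acc i => acc ++ [(PySem.List.pyGetD cs i ' ', i)]) []
  let mov := PySem.List.sorted org (fun x => x.1) false
  org.foldl (fun positions i =>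
      (mov.foldl (fun s j => if i.2 ≠ j.2 then (s.1, s.2 + 1) else (s.1 ++ [s.2], 0))
        (positions, (0 : Int))).1)
    []

-- ===== PORT B =====
def get_original_positions_alt (original : String) : List Int :=
  let cs := original.toList
  let order := PySem.List.sorted (PySem.List.pyRange 0 (cs.length : Int) 1)
      (fun i => PySem.List.pyGetD cs i ' ') false
  (PySem.List.enumerate order).foldl
    (fun positions ri => PySem.List.pySetD positions ri.2 ri.1)
    (List.replicate cs.length (0 : Int))

-- ===== PRECONDITION & SPEC =====
def Spec_get_original_positions (original : String) (out : List Int) : Prop := out = get_original_positions_alt original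
instance (original : String) (out : List Int) : Decidable (Spec_get_original_positions original out) := by unfold Spec_get_original_positions; infer_instance

-- ===== CLAIM (what is proved, stated in full; the proofs are below) =====
def Claim_equal_get_original_positions : Prop := ∀ (original : String), Dom_get_original_positions original → Spec_get_original_positions original (get_original_positions original)

-- ===== LEMMAS AND PROOFS =====

-- sorting a mapped list with a key that only reads the pre-image sorts the pre-images
theorem pv_insertBy_map {α β : Type} (f : α → β) (B : α → α → Bool) (B' : β → β → Bool)
    (h : ∀ a b, B' (f a) (f b) = B a b) (x : α) (ys : List α) :
    PySem.List.insertBy B' (f x) (ys.map f) = (PySem.List.insertBy B x ys).map f := by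
  induction ys with
  | nil => simp [PySem.List.insertBy]
  | cons y ys ih =>
    simp only [List.map_cons, PySem.List.insertBy, h x y]
    by_cases hb : B x y
    · simp [hb]
    · simp [hb, ih]

theorem pv_foldl_insertBy_map {α β : Type} (f : α → β) (B : α → α → Bool) (B' : β → β → Bool)
    (h : ∀ a b, B' (f a) (f b) = B a b) (l : List α) (acc : List α) :
    (l.map f).foldl (fun a x => PySem.List.insertBy B' x a) (acc.map f)
      = (l.foldl (fun a x => PySem.List.insertBy B x a) acc).map f := by
  induction l generalizing acc with
  | nil => rfl
  | cons x xs ih =>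
    simp only [List.map_cons, List.foldl_cons]
    rw [pv_insertBy_map f B B' h x acc, ih]

theorem pv_sorted_map {α β κ : Type} [LinearOrder κ] (f : α → β) (key : β → κ) (l : List α) :
    PySem.List.sorted (l.map f) key false
      = (PySem.List.sorted l (fun a => key (f a)) false).map f := by
  rw [PySem.List.sorted_eq_foldl_insertBy, PySem.List.sorted_eq_foldl_insertBy]
  have := pv_foldl_insertBy_map f
      (fun a b => decide (key (f a) < key (f b)))
      (fun a b => decide (key a < key b)) (fun a b => rfl) l []
  simpa using this

-- A's inner scan over a match-free segment only increments the counter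
theorem pv_inner_no_match (k : Int) (l : List Int) (h : k ∉ l) (pos : List Int) (idx : Int) :
    l.foldl (fun s a => if k ≠ a then (s.1, s.2 + 1) else (s.1 ++ [s.2], 0)) (pos, idx)
      = (pos, idx + l.length) := by
  induction l generalizing idx with
  | nil => simp
  | cons x xs ih =>
    simp only [List.mem_cons, not_or] at h
    simp only [List.foldl_cons, if_pos h.1, ih h.2, List.length_cons, Prod.mk.injEq, true_and]
    push_cast; ring

-- A's inner scan appends exactly the position of the unique match
theorem pv_inner_split (k : Int) (m1 m2 : List Int) (h1 : k ∉ m1) (h2 : k ∉ m2) (pos : List Int) :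
    ((m1 ++ k :: m2).foldl (fun s a => if k ≠ a then (s.1, s.2 + 1) else (s.1 ++ [s.2], 0))
        (pos, (0 : Int))).1 = pos ++ [(m1.length : Int)] := by
  rw [List.foldl_append, pv_inner_no_match k m1 h1 pos 0, List.foldl_cons]
  rw [if_neg (by simp)]
  rw [pv_inner_no_match k m2 h2]
  simp

-- a nodup list splits at any member, with the prefix length equal to idxOf
theorem pv_exists_split (l : List Int) (k : Int) (hk : k ∈ l) (hnd : l.Nodup) :
    ∃ m1 m2, l = m1 ++ k :: m2 ∧ k ∉ m1 ∧ k ∉ m2 ∧ m1.length = l.idxOf k := by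
  induction l with
  | nil => cases hk
  | cons x xs ih =>
    rcases List.nodup_cons.mp hnd with ⟨hx, hxs⟩
    by_cases hkx : k = x
    · subst hkx
      exact ⟨[], xs, rfl, by simp, hx, by simp⟩
    · have hk' : k ∈ xs := by
        rcases List.mem_cons.mp hk with h | h
        · exact absurd h hkx
        · exact h
      rcases ih hk' hxs with ⟨m1, m2, heq, h1, h2, hlen⟩
      refine ⟨x :: m1, m2, by simp [heq], ?_, h2, ?_⟩
      · simp [hkx, h1]
      · have hbe : (x == k) = false := by rw [beq_eq_false_iff_ne]; exact fun h => hkx h.symm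
        simp [List.idxOf_cons, hbe, hlen]

-- the scatter loop of B, characterised pointwise
theorem pv_scatter (l : List Int) (s : Int) (acc : List Int)
    (hnd : l.Nodup) (hb : ∀ i ∈ l, 0 ≤ i ∧ i.toNat < acc.length) (t : Nat) :
    ((PySem.List.enumerate l s).foldl
        (fun positions ri => PySem.List.pySetD positions ri.2 ri.1) acc)[t]?
      = if (t : Int) ∈ l then some (s + l.idxOf (t : Int)) else acc[t]? := by
  induction l generalizing s acc with
  | nil => simp
  | cons x xs ih =>
    rcases List.nodup_cons.mp hnd with ⟨hx, hxs⟩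
    rcases hb x (by simp) with ⟨hx0, hxlt⟩
    rw [PySem.List.enumerate_cons, List.foldl_cons]
    have hset : PySem.List.pySetD acc x s = acc.set x.toNat s :=
      PySem.List.pySetD_of_nonneg acc s hx0
    rw [hset, ih (s + 1) _ hxs (fun i hi => by
      rcases hb i (by simp [hi]) with ⟨h0, hlt⟩
      exact ⟨h0, by simpa using hlt⟩)]
    by_cases hmem : (t : Int) ∈ xs
    · have hne : (t : Int) ≠ x := fun h => hx (h ▸ hmem)
      have hbe : (x == (t : Int)) = false := by
        simp only [beq_eq_false_iff_ne, ne_eq]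
        exact fun h => hne (h.symm)
      simp only [List.mem_cons, hmem, or_true, if_pos, List.idxOf_cons, hbe,
        cond_false, Option.some.injEq]
      push_cast; ring
    · rw [if_neg hmem]
      by_cases htx : (t : Int) = x
      · have ht : t = x.toNat := by omega
        subst ht
        simp only [List.mem_cons, htx, true_or, if_pos, List.idxOf_cons]
        simp [List.getElem?_set_self hxlt]
      · have : t ≠ x.toNat := fun h => htx (by omega)
        simp only [List.mem_cons, htx, hmem, or_self, if_neg, not_false_eq_true]
        rw [List.getElem?_set_ne (by omega)]


-- A's inner scan over the sorted index order appends exactly the rank (idxOf) of k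
theorem pv_rank_step (cs : List Char) (k : Int)
    (hk : k ∈ PySem.List.pyRange 0 (cs.length : Int) 1) (pos : List Int) :
    ((PySem.List.sorted (PySem.List.pyRange 0 (cs.length : Int) 1)
        (fun i => PySem.List.pyGetD cs i ' ') false).foldl
      (fun s a => if k ≠ a then (s.1, s.2 + 1) else (s.1 ++ [s.2], 0)) (pos, (0 : Int))).1
    = pos ++ [((PySem.List.sorted (PySem.List.pyRange 0 (cs.length : Int) 1)
        (fun i => PySem.List.pyGetD cs i ' ') false).idxOf k : Int)] := by
  have hperm := PySem.List.sorted_perm (PySem.List.pyRange 0 (cs.length : Int) 1)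
      (fun i => PySem.List.pyGetD cs i ' ') false
  have hnd := hperm.nodup_iff.mpr (PySem.List.nodup_pyRange_one 0 (cs.length : Int))
  have hmem := hperm.mem_iff.mpr hk
  rcases pv_exists_split _ k hmem hnd with ⟨m1, m2, heq, h1, h2, hlen⟩
  rw [heq] at hlen ⊢
  rw [pv_inner_split k m1 m2 h1 h2 pos, hlen]

-- A computes the rank map over the original indices
theorem pv_A (cs : List Char) :
    ((PySem.List.pyRange 0 (cs.length : Int) 1).foldl
        (fun acc i => acc ++ [(PySem.List.pyGetD cs i ' ', i)]) []).foldl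
      (fun positions i =>
        ((PySem.List.sorted ((PySem.List.pyRange 0 (cs.length : Int) 1).foldl
              (fun acc i => acc ++ [(PySem.List.pyGetD cs i ' ', i)]) [])
            (fun x => x.1) false).foldl
          (fun s j => if i.2 ≠ j.2 then (s.1, s.2 + 1) else (s.1 ++ [s.2], 0))
          (positions, (0 : Int))).1)
      []
    = (PySem.List.pyRange 0 (cs.length : Int) 1).map
        (fun k => ((PySem.List.sorted (PySem.List.pyRange 0 (cs.length : Int) 1)
            (fun i => PySem.List.pyGetD cs i ' ') false).idxOf k : Int)) := by
  have horg : (PySem.List.pyRange 0 (cs.length : Int) 1).foldl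
      (fun acc i => acc ++ [(PySem.List.pyGetD cs i ' ', i)]) []
      = (PySem.List.pyRange 0 (cs.length : Int) 1).map
          (fun i => (PySem.List.pyGetD cs i ' ', i)) := by
    simpa using PySem.List.foldl_append_singleton_eq_map
      (fun i => (PySem.List.pyGetD cs i ' ', i)) (PySem.List.pyRange 0 (cs.length : Int) 1) []
  rw [horg, pv_sorted_map (fun i => (PySem.List.pyGetD cs i ' ', i)) (fun x => x.1)]
  rw [List.foldl_map]
  simp only [List.foldl_map]
  refine (PySem.List.foldl_congr_mem _ _
      (fun positions k => positions ++ [((PySem.List.sorted (PySem.List.pyRange 0 (cs.length : Int) 1)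
            (fun i => PySem.List.pyGetD cs i ' ') false).idxOf k : Int)]) [] ?_).trans ?_
  · intro acc x hx
    exact pv_rank_step cs x hx acc
  · simpa using PySem.List.foldl_append_singleton_eq_map
      (fun k => ((PySem.List.sorted (PySem.List.pyRange 0 (cs.length : Int) 1)
          (fun i => PySem.List.pyGetD cs i ' ') false).idxOf k : Int))
      (PySem.List.pyRange 0 (cs.length : Int) 1) []

-- B computes the same rank map, via the scatter characterisation
theorem pv_B (cs : List Char) :
    (PySem.List.enumerate (PySem.List.sorted (PySem.List.pyRange 0 (cs.length : Int) 1)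
        (fun i => PySem.List.pyGetD cs i ' ') false)).foldl
      (fun positions ri => PySem.List.pySetD positions ri.2 ri.1)
      (List.replicate cs.length (0 : Int))
    = (PySem.List.pyRange 0 (cs.length : Int) 1).map
        (fun k => ((PySem.List.sorted (PySem.List.pyRange 0 (cs.length : Int) 1)
            (fun i => PySem.List.pyGetD cs i ' ') false).idxOf k : Int)) := by
  have hperm := PySem.List.sorted_perm (PySem.List.pyRange 0 (cs.length : Int) 1)
      (fun i => PySem.List.pyGetD cs i ' ') false
  have hnd := hperm.nodup_iff.mpr (PySem.List.nodup_pyRange_one 0 (cs.length : Int))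
  have hmr : ∀ x : Int, x ∈ PySem.List.sorted (PySem.List.pyRange 0 (cs.length : Int) 1)
      (fun i => PySem.List.pyGetD cs i ' ') false ↔ 0 ≤ x ∧ x < (cs.length : Int) := fun x =>
    hperm.mem_iff.trans PySem.List.mem_pyRange_one
  apply List.ext_getElem?
  intro t
  rw [pv_scatter _ 0 _ hnd (fun i hi => by
    have h := (hmr i).mp hi
    exact ⟨h.1, by simp only [List.length_replicate]; omega⟩) t]
  rw [List.getElem?_map]
  by_cases ht : t < cs.length
  · have hmem : (t : Int) ∈ PySem.List.sorted (PySem.List.pyRange 0 (cs.length : Int) 1)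
        (fun i => PySem.List.pyGetD cs i ' ') false :=
      (hmr _).mpr ⟨Int.natCast_nonneg t, by exact_mod_cast ht⟩
    rw [if_pos hmem]
    have hr : (PySem.List.pyRange 0 (cs.length : Int) 1)[t]? = some ((0 : Int) + t) := by
      rw [PySem.List.getElem?_pyRange_one]
      simp [ht]
    rw [hr]
    simp
  · have h2 : (PySem.List.pyRange 0 (cs.length : Int) 1)[t]? = (none : Option Int) := by
      rw [PySem.List.getElem?_pyRange_one]
      simp only [ite_eq_right_iff]
      intro h; omega
    rw [if_neg (fun hmem => ht (by exact_mod_cast ((hmr _).mp hmem).2)), h2]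
    simp [List.getElem?_replicate]
    omega

-- ===== VERDICT (by name: the statement is the Claim_ definition above) =====
theorem get_original_positions_spec : Claim_equal_get_original_positions := by
  intro original _
  show get_original_positions original = get_original_positions_alt original
  exact (pv_A original.toList).trans (pv_B original.toList).symm
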